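-- pv_equiv track=rewrite | github.com/byeonggyu-shin/SW-Jungle-Algorithm | 1week/1074.py | search
-- ===== SOURCE A (Python) =====
-- def search(n, r, c, count):
--     if n == 0:
--         return count
--     half = 2**(n-1)
--     if r < half and c < half:
--         return search(n-1, r, c, count)
--     elif r < half and c >= half:
--         return search(n-1, r, c-half, count+2**(2*n-2))
--     elif r >= half and c < half:
--         return search(n-1, r-half, c, count+2**(2*n-2)*2)
--     else:
--         return search(n-1, r-half, c-half, count+2**(2*n-2)*3)
-- ===== SOURCE B (Python) =====
-- def search(n, r, c, count):
--     acc = count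
--     for level in range(n, 0, -1):
--         half = 2 ** (level - 1)
--         quad = 2 ** (2 * level - 2)
--         rbit = 1 if r >= half else 0
--         cbit = 1 if c >= half else 0
--         acc += quad * (2 * rbit + cbit)
--         if rbit:
--             r -= half
--         if cbit:
--             c -= half
--     return acc
-- ===== Notes on version B (the rewrite author's own statement) =====
-- stated objective: alternative
-- what changed: Replaced the n-level tail recursion threading (r, c, count) through four explicit branch calls by an iterative for-loop over levels n..1 that maintains (r, c, acc) in place and adds quad*(2*rbit+cbit) per level.
import Mathlib
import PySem

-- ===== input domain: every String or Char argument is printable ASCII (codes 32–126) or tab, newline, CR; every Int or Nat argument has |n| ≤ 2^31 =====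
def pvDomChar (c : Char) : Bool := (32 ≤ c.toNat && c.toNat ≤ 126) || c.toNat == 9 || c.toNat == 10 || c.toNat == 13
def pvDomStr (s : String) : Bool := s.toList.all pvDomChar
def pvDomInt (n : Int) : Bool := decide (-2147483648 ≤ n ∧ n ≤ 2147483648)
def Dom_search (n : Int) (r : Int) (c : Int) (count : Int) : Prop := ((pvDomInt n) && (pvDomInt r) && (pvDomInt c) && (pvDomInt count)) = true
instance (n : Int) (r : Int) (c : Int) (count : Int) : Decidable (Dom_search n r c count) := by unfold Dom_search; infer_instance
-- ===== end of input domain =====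

-- B replaces A's n-level tail recursion by an iterative fold over levels n..1 with the same
-- compare-and-subtract per level (objective: alternative decomposition, same cost).


-- ===== PORT A =====
-- fuel = n.toNat: for n ≥ 0 the recursion hits n = 0 exactly when the fuel runs out,
-- so this is a step-for-step transliteration of A on the whole of Pre_.
def searchA (fuel : Nat) (n : Int) (r : Int) (c : Int) (count : Int) : Int :=
  match fuel with
  | 0 => count
  | fuel + 1 =>
    if n = 0 then count
    else
      let half : Int := 2 ^ (n - 1).toNat
      if r < half ∧ c < half then searchA fuel (n - 1) r c count
      else if r < half ∧ c ≥ half then searchA fuel (n - 1) r (c - half) (count + 2 ^ (2 * n - 2).toNat)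
      else if r ≥ half ∧ c < half then searchA fuel (n - 1) (r - half) c (count + 2 ^ (2 * n - 2).toNat * 2)
      else searchA fuel (n - 1) (r - half) (c - half) (count + 2 ^ (2 * n - 2).toNat * 3)

def search (n : Int) (r : Int) (c : Int) (count : Int) : Int :=
  searchA n.toNat n r c count

-- ===== PORT B =====
def search_alt (n : Int) (r : Int) (c : Int) (count : Int) : Int :=
  (((PySem.List.pyRange n 0 (-1)).foldl (fun (st : Int × Int × Int) level =>
      let half : Int := 2 ^ (level - 1).toNat
      let quad : Int := 2 ^ (2 * level - 2).toNat
      let rbit : Int := if st.1 ≥ half then 1 else 0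
      let cbit : Int := if st.2.1 ≥ half then 1 else 0
      (if st.1 ≥ half then st.1 - half else st.1,
       if st.2.1 ≥ half then st.2.1 - half else st.2.1,
       st.2.2 + quad * (2 * rbit + cbit))) (r, c, count))).2.2

-- ===== PRECONDITION & SPEC =====
-- A's recursion reaches the n = 0 base case only for n ≥ 0; on negative n it raises RecursionError.
def Pre_search (n : Int) (r : Int) (c : Int) (count : Int) : Prop := 0 ≤ n
instance (n : Int) (r : Int) (c : Int) (count : Int) : Decidable (Pre_search n r c count) := by unfold Pre_search; infer_instance
def pvWitness_search : Int × Int × Int × Int := (2, 1, 3, 0)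

def Spec_search (n : Int) (r : Int) (c : Int) (count : Int) (out : Int) : Prop := out = search_alt n r c count
instance (n : Int) (r : Int) (c : Int) (count : Int) (out : Int) : Decidable (Spec_search n r c count out) := by unfold Spec_search; infer_instance

-- ===== CLAIM (what is proved, stated in full; the proofs are below) =====
def Claim_equal_search : Prop := ∀ (n : Int) (r : Int) (c : Int) (count : Int), Dom_search n r c count → Pre_search n r c count → Spec_search n r c count (search n r c count)

-- ===== LEMMAS AND PROOFS =====
lemma search_alt_succ (m r c acc : Int) (hm : 0 < m) :
    search_alt m r c acc =
      search_alt (m - 1)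
        (if r ≥ 2 ^ (m - 1).toNat then r - 2 ^ (m - 1).toNat else r)
        (if c ≥ 2 ^ (m - 1).toNat then c - 2 ^ (m - 1).toNat else c)
        (acc + 2 ^ (2 * m - 2).toNat *
          (2 * (if r ≥ 2 ^ (m - 1).toNat then (1 : Int) else 0) +
             (if c ≥ 2 ^ (m - 1).toNat then (1 : Int) else 0))) := by
  unfold search_alt
  rw [PySem.List.pyRange_neg_one_cons hm, List.foldl_cons]

lemma searchA_eq_alt (k : Nat) : ∀ r c count : Int, searchA k (k : Int) r c count = search_alt (k : Int) r c count := by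
  induction k with
  | zero =>
    intro r c count
    simp [searchA, search_alt, PySem.List.pyRange_neg_one_eq_nil]
  | succ k ih =>
    intro r c count
    have hk1 : ((k + 1 : Nat) : Int) - 1 = (k : Int) := by push_cast; ring
    have hpos : (0 : Int) < ((k + 1 : Nat) : Int) := by exact_mod_cast Nat.succ_pos k
    rw [search_alt_succ _ r c count hpos]
    simp only [searchA, if_neg (ne_of_gt hpos)]
    rw [hk1, ← ih]
    by_cases hr : r < 2 ^ ((k : Int)).toNat <;> by_cases hc : c < 2 ^ ((k : Int)).toNat
    · rw [if_pos ⟨hr, hc⟩, if_neg (not_le.mpr hr), if_neg (not_le.mpr hc),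
        if_neg (not_le.mpr hr), if_neg (not_le.mpr hc)]
      norm_num
    · rw [if_neg (by tauto), if_pos ⟨hr, not_lt.mp hc⟩, if_neg (not_le.mpr hr),
        if_pos (not_lt.mp hc), if_neg (not_le.mpr hr), if_pos (not_lt.mp hc)]
      norm_num
    · rw [if_neg (by tauto), if_neg (by tauto), if_pos ⟨not_lt.mp hr, hc⟩,
        if_pos (not_lt.mp hr), if_neg (not_le.mpr hc), if_pos (not_lt.mp hr),
        if_neg (not_le.mpr hc)]
      norm_num
    · rw [if_neg (by tauto), if_neg (by tauto), if_neg (by tauto),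
        if_pos (not_lt.mp hr), if_pos (not_lt.mp hc), if_pos (not_lt.mp hr),
        if_pos (not_lt.mp hc)]
      norm_num

-- ===== VERDICT (by name: the statement is the Claim_ definition above) =====
theorem search_spec : Claim_equal_search := by
  intro n r c count _ hpre
  unfold Spec_search search
  have hn : ((n.toNat : Nat) : Int) = n := Int.toNat_of_nonneg hpre
  have := searchA_eq_alt n.toNat r c count
  rw [hn] at this
  exact this
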